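-- pv_equiv track=rewrite | github.com/aadityaa-yadav3/CODES | Codeforces/Div.2/18-06-2023(1)/Ques2.py | max_weapon_strength
-- ===== SOURCE A (Python) =====
-- def max_weapon_strength(L, R):
--
--     maxl = max(len(str(L)), len(str(R)))
--     l = "0"*(maxl-len(str(L))) + str(L)
--     r = "0"*(maxl-len(str(R))) + str(R)
--     max_strength = int (r[0])- int(l[0])
--     ch = 1
--     for i in range(1, maxl):
--         if ch == 1 and l[i-1] == r[i-1]:
--             max_strength += int(r[i]) - int(l[i])
--         else:
--             ch = 0
--             max_strength += 9
--     return max_strength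
-- ===== SOURCE B (Python) =====
-- def max_weapon_strength(L, R):
--     l, r = str(L), str(R)
--     maxl = max(len(l), len(r))
--     l = l.rjust(maxl, "0")
--     r = r.rjust(maxl, "0")
--     for j in range(maxl):
--         if l[j] != r[j]:
--             return int(r[j]) - int(l[j]) + 9 * (maxl - 1 - j)
--     return 0
-- ===== Notes on version B (the rewrite author's own statement) =====
-- stated objective: simpler
-- what changed: Replaces A's stateful flag-and-accumulator loop (running prefix sum with a 'ch' flag) by a scan for the first divergent digit followed by a closed-form answer digit-difference + 9*(remaining digits), returning 0 when the padded strings are identical.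
-- outside the precondition, e.g. on max_weapon_strength(-5, 100): A returns 19, B returns 19
import Mathlib
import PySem

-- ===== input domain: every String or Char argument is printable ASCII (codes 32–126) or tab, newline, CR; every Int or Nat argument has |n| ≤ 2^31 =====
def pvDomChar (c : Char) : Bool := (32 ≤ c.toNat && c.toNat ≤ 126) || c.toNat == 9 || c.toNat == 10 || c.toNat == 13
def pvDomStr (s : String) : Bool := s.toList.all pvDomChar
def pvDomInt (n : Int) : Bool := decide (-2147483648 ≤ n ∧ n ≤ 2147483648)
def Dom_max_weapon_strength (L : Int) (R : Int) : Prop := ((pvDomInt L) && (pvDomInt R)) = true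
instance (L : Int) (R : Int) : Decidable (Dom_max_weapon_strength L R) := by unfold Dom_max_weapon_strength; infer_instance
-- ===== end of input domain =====

-- B replaces A's stateful flag-and-accumulator digit loop by a scan for the first divergent
-- padded digit followed by a closed-form tail (objective: simpler); equivalence proved for
-- nonnegative L, R (Pre_).


-- ===== PORT A =====
-- int() applied to a one-character string, as both Pythons apply it to a digit character;
-- exact wherever Python's int() returns (non-digit characters, where Python raises, are outside Pre_).
def pvInt1 (c : Char) : Int := (PySem.Int.ofChars? [c]).getD 0

-- the 'for i in range(1, maxl)' loop of A, with its (max_strength, ch) state, as structural recursion on i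
def pvALoop (l r : List Char) (maxl : Nat) (i : Nat) (ms : Int) (ch : Int) : Int :=
  if i < maxl then
    if ch == 1 && (l.getD (i-1) ' ' == r.getD (i-1) ' ') then
      pvALoop l r maxl (i+1) (ms + (pvInt1 (r.getD i ' ') - pvInt1 (l.getD i ' '))) ch
    else
      pvALoop l r maxl (i+1) (ms + 9) 0
  else ms
termination_by maxl - i

def max_weapon_strength (L : Int) (R : Int) : Int :=
  let sL := PySem.Int.toChars L
  let sR := PySem.Int.toChars R
  let maxl := max sL.length sR.length
  let l := List.replicate (maxl - sL.length) '0' ++ sL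
  let r := List.replicate (maxl - sR.length) '0' ++ sR
  let ms := pvInt1 (r.getD 0 ' ') - pvInt1 (l.getD 0 ' ')
  pvALoop l r maxl 1 ms 1

-- ===== PORT B =====
-- B's 'for j, … in enumerate(zip(l, r))' early-return scan
def pvBScan (maxl : Int) (j : Int) : List (Char × Char) → Int
  | [] => 0
  | (cl, cr) :: rest =>
    if cl ≠ cr then pvInt1 cr - pvInt1 cl + 9 * (maxl - 1 - j)
    else pvBScan maxl (j+1) rest

def max_weapon_strength_alt (L : Int) (R : Int) : Int :=
  let l0 := PySem.Int.toChars L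
  let r0 := PySem.Int.toChars R
  let maxl := max l0.length r0.length
  let l := List.replicate (maxl - l0.length) '0' ++ l0
  let r := List.replicate (maxl - r0.length) '0' ++ r0
  pvBScan (maxl : Int) 0 (l.zip r)

-- ===== PRECONDITION & SPEC =====
-- Pre_ restricts to the task's natural domain of nonnegative integers: str() of a negative number
-- yields a '-' sign, on which A raises ValueError (int('-')) whenever the padded strings agree up to
-- the sign position (e.g. L = R = -5), and where A happens to return, the value is an accident of
-- zero-padding a signed string (B agrees with A there anyway).
def Pre_max_weapon_strength (L : Int) (R : Int) : Prop := 0 ≤ L ∧ 0 ≤ R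
instance (L : Int) (R : Int) : Decidable (Pre_max_weapon_strength L R) := by unfold Pre_max_weapon_strength; infer_instance

def pvWitness_max_weapon_strength : Int × Int := (17, 9)

def Spec_max_weapon_strength (L : Int) (R : Int) (out : Int) : Prop := out = max_weapon_strength_alt L R
instance (L : Int) (R : Int) (out : Int) : Decidable (Spec_max_weapon_strength L R out) := by unfold Spec_max_weapon_strength; infer_instance

-- ===== CLAIM (what is proved, stated in full; the proofs are below) =====
def Claim_equal_max_weapon_strength : Prop := ∀ (L : Int) (R : Int), Dom_max_weapon_strength L R → Pre_max_weapon_strength L R → Spec_max_weapon_strength L R (max_weapon_strength L R)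

-- ===== LEMMAS AND PROOFS =====

-- once ch = 0, A's loop just adds 9 for every remaining index
theorem pvALoop_ch0 (l r : List Char) (maxl : Nat) : ∀ i ms, pvALoop l r maxl i ms 0 = ms + 9 * ((maxl - i : Nat) : Int) := by
  intro i
  induction' hn : maxl - i using Nat.strong_induction_on with n IH generalizing i
  intro ms
  rw [pvALoop]
  by_cases h : i < maxl
  · rw [if_pos h]
    have hc : ((0 : Int) == 1 && (l.getD (i-1) ' ' == r.getD (i-1) ' ')) = false := by simp
    rw [hc, if_neg Bool.false_ne_true]
    rw [IH (maxl - (i+1)) (by omega) (i+1) rfl]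
    omega
  · rw [if_neg h]
    omega

-- main invariant: at index k+1 with equal prefixes, A's loop equals B's scan from index k
theorem pvALoop_eq_scan (l r : List Char) (maxl : Nat)
    (hl : l.length = maxl) (hr : r.length = maxl) :
    ∀ k, k + 1 ≤ maxl → l.take k = r.take k →
    pvALoop l r maxl (k+1) (pvInt1 (r.getD k ' ') - pvInt1 (l.getD k ' ')) 1
      = pvBScan (maxl : Int) (k : Int) ((l.zip r).drop k) := by
  intro k
  induction' hn : maxl - k using Nat.strong_induction_on with n IH generalizing k
  intro hk htake
  have hkl : k < l.length := by omega
  have hkr : k < r.length := by omega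
  have hz : k < (l.zip r).length := by rw [List.length_zip]; omega
  rw [List.drop_eq_getElem_cons hz, List.getElem_zip]
  rw [List.getD_eq_getElem l ' ' hkl, List.getD_eq_getElem r ' ' hkr]
  rw [pvALoop]
  by_cases hlt : k + 1 < maxl
  · rw [if_pos hlt]
    by_cases heq : l[k] = r[k]
    · -- equal digits at k: both proceed to k+1
      have hc : ((1 : Int) == 1 && (l.getD (k+1-1) ' ' == r.getD (k+1-1) ' ')) = true := by
        simp only [Nat.add_sub_cancel, List.getD_eq_getElem l ' ' hkl,
          List.getD_eq_getElem r ' ' hkr, heq]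
        simp
      rw [if_pos hc]
      have hms0 : pvInt1 r[k] - pvInt1 l[k] = 0 := by rw [heq]; ring
      rw [hms0, zero_add]
      have htake' : l.take (k+1) = r.take (k+1) := by
        rw [List.take_add_one, List.take_add_one, htake,
            List.getElem?_eq_getElem hkl, List.getElem?_eq_getElem hkr, heq]
      rw [IH (maxl - (k+1)) (by omega) (k+1) rfl (by omega) htake']
      simp only [pvBScan]
      rw [if_neg (not_not_intro heq)]
      norm_cast
    · -- first divergence at k: A switches to ch = 0, B returns the closed form
      have hc : ((1 : Int) == 1 && (l.getD (k+1-1) ' ' == r.getD (k+1-1) ' ')) = false := by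
        simp only [Nat.add_sub_cancel, List.getD_eq_getElem l ' ' hkl,
          List.getD_eq_getElem r ' ' hkr]
        simp [heq]
      rw [hc, if_neg Bool.false_ne_true]
      rw [pvALoop_ch0]
      simp only [pvBScan]
      rw [if_pos heq]
      have hcast : ((maxl - (k+1+1) : Nat) : Int) = (maxl : Int) - (k : Int) - 2 := by omega
      rw [hcast]; ring
  · -- last index: loop ends with ms; B's scan sees the final pair
    rw [if_neg hlt]
    simp only [pvBScan]
    have hdrop : (l.zip r).drop (k+1) = [] := by
      apply List.drop_eq_nil_of_le; rw [List.length_zip]; omega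
    by_cases heq : l[k] = r[k]
    · rw [if_neg (not_not_intro heq), hdrop]
      simp only [pvBScan]
      rw [heq]; ring
    · rw [if_pos heq]
      have hcast : (maxl : Int) - 1 - (k : Int) = 0 := by omega
      rw [hcast]; ring

-- the two ports agree for any pair of rendered digit strings (applied to toChars L / toChars R)
theorem pvMain (sL sR : List Char) :
    pvALoop (List.replicate (max sL.length sR.length - sL.length) '0' ++ sL)
            (List.replicate (max sL.length sR.length - sR.length) '0' ++ sR)
            (max sL.length sR.length) 1
            (pvInt1 ((List.replicate (max sL.length sR.length - sR.length) '0' ++ sR).getD 0 ' ')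
              - pvInt1 ((List.replicate (max sL.length sR.length - sL.length) '0' ++ sL).getD 0 ' ')) 1
      = pvBScan ((max sL.length sR.length : Nat) : Int) 0
          ((List.replicate (max sL.length sR.length - sL.length) '0' ++ sL).zip
           (List.replicate (max sL.length sR.length - sR.length) '0' ++ sR)) := by
  set maxl := max sL.length sR.length with hm
  set l := List.replicate (maxl - sL.length) '0' ++ sL with hldef
  set r := List.replicate (maxl - sR.length) '0' ++ sR with hrdef
  have hl : l.length = maxl := by
    rw [hldef, List.length_append, List.length_replicate]; omega
  have hr : r.length = maxl := by
    rw [hrdef, List.length_append, List.length_replicate]; omega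
  by_cases h0 : maxl = 0
  · -- both rendered strings empty: A returns ' '-' ' = 0, B scans an empty zip
    have hle : l = [] := List.eq_nil_of_length_eq_zero (by omega)
    have hre : r = [] := List.eq_nil_of_length_eq_zero (by omega)
    rw [hle, hre, h0]
    rw [pvALoop]
    simp [pvBScan]
  · have h := pvALoop_eq_scan l r maxl hl hr 0 (by omega) (by simp)
    simpa using h

-- ===== VERDICT (by name: the statement is the Claim_ definition above) =====
theorem max_weapon_strength_spec : Claim_equal_max_weapon_strength := by
  intro L R _ _
  show max_weapon_strength L R = max_weapon_strength_alt L R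
  exact pvMain (PySem.Int.toChars L) (PySem.Int.toChars R)
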